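-- pv_equiv track=rewrite | github.com/robert-nicol-de/voxcore | voxcore/voxquery/voxquery/formatting/charts.py | _extract_chart_title
-- ===== SOURCE A (Python) =====
-- def _extract_chart_title(question: str) -> str:
--     """Extract a clean chart title from the question"""
--     # Remove common question prefixes
--     title = question
--     prefixes = ["show ", "what ", "which ", "how many ", "list ", "display ", "get ", "find ", "tell me ", "give me "]
--     for prefix in prefixes:
--         if title.lower().startswith(prefix):
--             title = title[len(prefix):]
--             break
--
--     # Remove trailing question mark
--     title = title.rstrip("?").strip()
--
--     # Capitalize first letter
--     title = title[0].upper() + title[1:] if title else title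
--
--     return title
-- ===== SOURCE B (Python) =====
-- _ONE_WORD = {"show", "what", "which", "list", "display", "get", "find"}
-- _TWO_WORD = {"how": "many", "tell": "me", "give": "me"}
--
--
-- def _extract_chart_title(question: str) -> str:
--     """Extract a clean chart title from the question (word-based rewrite)."""
--     rest = question
--     i = question.find(" ")
--     if i >= 0:
--         w1 = question[:i].lower()
--         if w1 in _ONE_WORD:
--             rest = question[i + 1:]
--         elif w1 in _TWO_WORD:
--             tail = question[i + 1:]
--             j = tail.find(" ")
--             if j >= 0 and tail[:j].lower() == _TWO_WORD[w1]:
--                 rest = tail[j + 1:]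
--     rest = rest.rstrip("?").strip()
--     return rest[:1].upper() + rest[1:]
-- ===== Notes on version B (the rewrite author's own statement) =====
-- stated objective: alternative
-- what changed: Instead of scanning an ordered list of ten prefixes with a lowered startswith test per prefix, B finds the first space, lowers just the first one or two words, and looks them up in a word set / word-to-second-word table; the trailing question-mark rstrip, the strip and the first-letter capitalization are kept (B capitalizes via a slice instead of a conditional).
import Mathlib
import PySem

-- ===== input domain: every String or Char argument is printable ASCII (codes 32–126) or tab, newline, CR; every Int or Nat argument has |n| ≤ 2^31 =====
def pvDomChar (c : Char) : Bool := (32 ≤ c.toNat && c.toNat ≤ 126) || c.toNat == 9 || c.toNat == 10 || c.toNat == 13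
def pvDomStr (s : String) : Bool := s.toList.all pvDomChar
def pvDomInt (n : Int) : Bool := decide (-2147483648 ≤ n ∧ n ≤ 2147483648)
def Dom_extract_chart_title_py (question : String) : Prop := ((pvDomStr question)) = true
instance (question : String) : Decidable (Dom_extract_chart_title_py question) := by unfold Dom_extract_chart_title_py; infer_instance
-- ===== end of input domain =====

-- B replaces A's ordered scan of ten lowered-startswith prefix tests by extracting the first one or
-- two words (via str.find of the first space) and looking them up in a word set / word table
-- (objective: alternative).

-- ===== PORT A =====
-- exact port of s.rstrip("?"): drop trailing characters that are in the set {'?'} (CPython str.rstrip(chars));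
-- this very call appears verbatim in both Pythons, so both ports share it
def pvRstripQ (s : List Char) : List Char :=
  (s.reverse.dropWhile (fun c => c == '?')).reverse

def pvPrefixes : List (List Char) :=
  ["show ".toList, "what ".toList, "which ".toList, "how many ".toList, "list ".toList,
   "display ".toList, "get ".toList, "find ".toList, "tell me ".toList, "give me ".toList]

-- the 'for prefix in prefixes: if title.lower().startswith(prefix): title = title[len(prefix):]; break'
def pvLoopA (title : List Char) : List (List Char) → List Char
  | [] => title
  | p :: ps =>
      if PySem.Chars.startswith (PySem.Chars.lower title) p then
        PySem.Chars.slice title (some (p.length : Int)) none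
      else pvLoopA title ps

def extract_chart_title_py (question : String) : String :=
  let title := pvLoopA question.toList pvPrefixes
  let title := PySem.Chars.strip (pvRstripQ title)
  -- 'title[0].upper() + title[1:] if title else title' (title[0] is the one-character string, upper-cased)
  String.ofList (match title with
    | [] => ([] : List Char)
    | c :: cs => PySem.Chars.upperChar c :: cs)

-- ===== PORT B =====
def pvOneWord : List (List Char) :=
  ["show".toList, "what".toList, "which".toList, "list".toList, "display".toList,
   "get".toList, "find".toList]

def pvTwoWord : PySem.Dict (List Char) (List Char) :=
  ⟨[("how".toList, "many".toList), ("tell".toList, "me".toList), ("give".toList, "me".toList)]⟩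

def extract_chart_title_py_alt (question : String) : String :=
  let l := question.toList
  let i := PySem.Chars.find l [' ']
  let rest :=
    if 0 ≤ i then
      let w1 := PySem.Chars.lower (PySem.Chars.slice l none (some i))
      if pvOneWord.contains w1 then
        PySem.Chars.slice l (some (i + 1)) none
      else
        match PySem.Dict.get? pvTwoWord w1 with
        | some w2 =>
            let tl := PySem.Chars.slice l (some (i + 1)) none
            let j := PySem.Chars.find tl [' ']
            if 0 ≤ j ∧ PySem.Chars.lower (PySem.Chars.slice tl none (some j)) = w2 then
              PySem.Chars.slice tl (some (j + 1)) none
            else l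
        | none => l
    else l
  let rest := PySem.Chars.strip (pvRstripQ rest)
  String.ofList (PySem.Chars.upper (PySem.Chars.slice rest none (some 1)) ++
    PySem.Chars.slice rest (some 1) none)

-- ===== PRECONDITION & SPEC =====
def Spec_extract_chart_title_py (question : String) (out : String) : Prop := out = extract_chart_title_py_alt question
instance (question : String) (out : String) : Decidable (Spec_extract_chart_title_py question out) := by unfold Spec_extract_chart_title_py; infer_instance

-- ===== CLAIM (what is proved, stated in full; the proofs are below) =====
def Claim_equal_extract_chart_title_py : Prop := ∀ (question : String), Dom_extract_chart_title_py question → Spec_extract_chart_title_py question (extract_chart_title_py question)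

-- ===== LEMMAS AND PROOFS =====

-- lowering a character yields a space only for a space
lemma pv_lowerChar_eq_space {c : Char} : PySem.Chars.lowerChar c = ' ' ↔ c = ' ' := by
  unfold PySem.Chars.lowerChar PySem.Chars.isupper
  split_ifs with h
  · simp only [decide_eq_true_eq, Bool.and_eq_true] at h
    constructor
    · intro he
      exfalso
      have h1 : 65 ≤ c.toNat := h.1
      have h2 : c.toNat ≤ 90 := h.2
      have he' := congrArg Char.toNat he
      rw [Char.toNat_ofNat] at he'
      rw [if_pos (by left; omega : (c.toNat + 32).isValidChar)] at he'
      have : c.toNat + 32 = 32 := he'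
      omega
    · intro he; subst he; simp at h
  · simp

lemma pv_space_notmem_lower {a : List Char} (ha : ' ' ∉ a) : ' ' ∉ PySem.Chars.lower a := by
  unfold PySem.Chars.lower
  simp only [List.mem_map, not_exists, not_and]
  intro c hc he
  exact ha (pv_lowerChar_eq_space.mp he ▸ hc)

lemma pv_len_of_lower {a w : List Char} (h : PySem.Chars.lower a = w) : a.length = w.length := by
  have := congrArg List.length h
  simpa [PySem.Chars.lower] using this

-- find.go scanning past a space-free block
lemma pv_findgo_append {a : List Char} (ha : ' ' ∉ a) (b : List Char) : ∀ (k : Nat),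
    PySem.Chars.find.go [' '] (a ++ ' ' :: b) k = ((k + a.length : Nat) : Int) := by
  induction a with
  | nil => intro k; simp [PySem.Chars.find.go, List.isPrefixOf]
  | cons c t ih =>
    intro k
    have hc : c ≠ ' ' := fun he => ha (he ▸ List.mem_cons_self)
    have ht : ' ' ∉ t := fun hm => ha (List.mem_cons_of_mem _ hm)
    rw [List.cons_append, show PySem.Chars.find.go [' '] (c :: (t ++ ' ' :: b)) k =
        if [' '].isPrefixOf (c :: (t ++ ' ' :: b)) then (k : Int)
        else PySem.Chars.find.go [' '] (t ++ ' ' :: b) (k+1) from by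
      simp [PySem.Chars.find.go]]
    rw [if_neg (by simp [List.isPrefixOf]; exact fun he => hc he.symm)]
    rw [ih ht (k+1)]
    congr 1
    simp; omega

lemma pv_find_append {a : List Char} (ha : ' ' ∉ a) (b : List Char) :
    PySem.Chars.find (a ++ ' ' :: b) [' '] = (a.length : Int) := by
  unfold PySem.Chars.find
  simpa using pv_findgo_append ha b 0

lemma pv_findgo_no_space {l : List Char} (h : ' ' ∉ l) : ∀ (k : Nat),
    PySem.Chars.find.go [' '] l k = -1 := by
  induction l with
  | nil => intro k; simp [PySem.Chars.find.go]
  | cons c t ih =>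
    intro k
    have hc : c ≠ ' ' := fun he => h (he ▸ List.mem_cons_self)
    have ht : ' ' ∉ t := fun hm => h (List.mem_cons_of_mem _ hm)
    rw [show PySem.Chars.find.go [' '] (c :: t) k =
        if [' '].isPrefixOf (c :: t) then (k : Int) else PySem.Chars.find.go [' '] t (k+1) from by
      simp [PySem.Chars.find.go]]
    rw [if_neg (by simp [List.isPrefixOf]; exact fun he => hc he.symm)]
    exact ih ht (k+1)

lemma pv_find_no_space {l : List Char} (h : ' ' ∉ l) :
    PySem.Chars.find l [' '] = -1 := by
  unfold PySem.Chars.find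
  exact pv_findgo_no_space h 0

-- a pattern containing a space can only match across the first space
lemma pv_prefix_split {w : List Char} (hw : ' ' ∉ w) :
    ∀ {a : List Char}, ' ' ∉ a → ∀ (rest b : List Char),
      ((w ++ ' ' :: rest) <+: (a ++ ' ' :: b)) ↔ (w = a ∧ rest <+: b) := by
  induction w with
  | nil =>
    intro a ha rest b
    cases a with
    | nil => simp [List.cons_prefix_cons]
    | cons c t =>
      have hc : c ≠ ' ' := fun he => ha (he ▸ List.mem_cons_self)
      simp [List.cons_prefix_cons]
      exact fun he => absurd he.symm hc
  | cons d w' ih =>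
    intro a ha rest b
    have hd : d ≠ ' ' := fun he => hw (he ▸ List.mem_cons_self)
    have hw' : ' ' ∉ w' := fun hm => hw (List.mem_cons_of_mem _ hm)
    cases a with
    | nil =>
      simp [List.cons_prefix_cons]
      exact fun he _ => hd he
    | cons c t =>
      have ht : ' ' ∉ t := fun hm => ha (List.mem_cons_of_mem _ hm)
      simp only [List.cons_append, List.cons_prefix_cons, ih hw' ht rest b, List.cons.injEq]
      tauto

lemma pv_startswith_false {p l : List Char} (hp : ' ' ∈ p) (hl : ' ' ∉ l) :
    PySem.Chars.startswith (PySem.Chars.lower l) p = false := by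
  rw [Bool.eq_false_iff]
  intro hs
  exact pv_space_notmem_lower hl ((PySem.Chars.startswith_iff _ _).mp hs |>.subset hp)

lemma pv_cond {w : List Char} (hw : ' ' ∉ w) {a : List Char} (ha : ' ' ∉ a) (rest b : List Char) :
    PySem.Chars.startswith (PySem.Chars.lower (a ++ ' ' :: b)) (w ++ ' ' :: rest)
      = (PySem.Chars.lower a == w && PySem.Chars.startswith (PySem.Chars.lower b) rest) := by
  have hsplit : PySem.Chars.lower (a ++ ' ' :: b)
      = PySem.Chars.lower a ++ ' ' :: PySem.Chars.lower b := by
    unfold PySem.Chars.lower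
    simp [show PySem.Chars.lowerChar ' ' = ' ' from by decide]
  rw [hsplit, Bool.eq_iff_iff, Bool.and_eq_true, beq_iff_eq,
      PySem.Chars.startswith_iff, PySem.Chars.startswith_iff,
      pv_prefix_split hw (pv_space_notmem_lower ha) rest (PySem.Chars.lower b)]
  tauto

-- the first-space decomposition of a string containing a space
lemma pv_first_space {l : List Char} (h : ' ' ∈ l) : ∃ a b, ' ' ∉ a ∧ l = a ++ ' ' :: b := by
  induction l with
  | nil => cases h
  | cons c t ih =>
    by_cases hc : c = ' '
    · exact ⟨[], t, by simp, by simp [hc]⟩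
    · have ht : ' ' ∈ t := by
        rcases List.mem_cons.mp h with he | hm
        · exact absurd he.symm hc
        · exact hm
      obtain ⟨a, b, ha, he⟩ := ih ht
      refine ⟨c :: a, b, ?_, by simp [he]⟩
      simp only [List.mem_cons, not_or]
      exact ⟨fun he2 => hc he2.symm, ha⟩

lemma pv_slice_take {a : List Char} (b : List Char) :
    PySem.Chars.slice (a ++ ' ' :: b) none (some (a.length : Int)) = a := by
  simp [PySem.List.slice_to_natCast]

lemma pv_slice_lit {a : List Char} (b : List Char) (n m : Nat) (h : a.length + 1 + m = n) :
    PySem.Chars.slice (a ++ ' ' :: b) (some ((n : Nat) : Int)) none = b.drop m := by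
  simp only [PySem.Chars.slice_eq_listSlice, PySem.List.slice_from_natCast]
  rw [show a ++ ' ' :: b = (a ++ [' ']) ++ b by simp, List.drop_append]
  rw [List.drop_eq_nil_of_le (by simp; omega), show n - (a ++ [' ']).length = m by simp; omega,
      List.nil_append]

lemma pv_slice_dropB {a : List Char} (b : List Char) :
    PySem.Chars.slice (a ++ ' ' :: b) (some ((a.length : Int) + 1)) none = b := by
  rw [show ((a.length : Int) + 1) = ((a.length + 1 : Nat) : Int) by push_cast; ring]
  simpa using pv_slice_lit b (a.length + 1) 0 (by omega)

lemma pv_slice_int {a : List Char} (b : List Char) (n : Int) (m : Nat)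
    (h : (a.length : Int) + 1 + m = n) :
    PySem.List.slice (a ++ ' ' :: b) (some n) none = List.drop m b := by
  rw [show n = ((a.length + 1 + m : Nat) : Int) by push_cast; omega,
      PySem.List.slice_from_natCast, show a ++ ' ' :: b = (a ++ [' ']) ++ b by simp,
      List.drop_append, List.drop_eq_nil_of_le (by simp)]
  simp

-- A's loop returns the input unchanged when it contains no space
lemma pv_loopA_no_space {l : List Char} (hl : ' ' ∉ l) :
    ∀ ps : List (List Char), (∀ p ∈ ps, ' ' ∈ p) → pvLoopA l ps = l := by
  intro ps
  induction ps with
  | nil => intro _; rfl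
  | cons p ps ih =>
    intro hps
    rw [pvLoopA, pv_startswith_false (hps p List.mem_cons_self) hl]
    simp only [Bool.false_eq_true, if_false]
    exact ih fun q hq => hps q (List.mem_cons_of_mem _ hq)

-- B's second-word test agrees with 'startswith w2 + space' on the remainder
lemma pv_inner (b l w2 w2s : List Char) (hw2 : ' ' ∉ w2) (hs : w2s = w2 ++ ' ' :: []) :
    (if 0 ≤ PySem.Chars.find b [' '] ∧
        PySem.Chars.lower (PySem.List.slice b none (some (PySem.Chars.find b [' ']))) = w2 then
      PySem.List.slice b (some (PySem.Chars.find b [' '] + 1)) none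
    else l)
    = if PySem.Chars.startswith (PySem.Chars.lower b) w2s = true then
        List.drop (w2.length + 1) b
      else l := by
  subst hs
  by_cases hb : ' ' ∈ b
  · obtain ⟨a2, b2, ha2, rfl⟩ := pv_first_space hb
    rw [pv_find_append ha2 b2, pv_cond hw2 ha2 [] b2,
        show PySem.List.slice (a2 ++ ' ' :: b2) none (some (a2.length : Int)) = a2 by
          have := pv_slice_take (a := a2) b2; simp only [PySem.Chars.slice_eq_listSlice] at this
          exact this,
        show PySem.List.slice (a2 ++ ' ' :: b2) (some ((a2.length : Int) + 1)) none = b2 by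
          simpa using pv_slice_dropB b2]
    by_cases h2 : PySem.Chars.lower a2 = w2
    · rw [if_pos ⟨Int.natCast_nonneg _, h2⟩]
      have hswt : (PySem.Chars.startswith (PySem.Chars.lower b2) [] : Bool) = true := by
        simp [PySem.Chars.startswith, List.isPrefixOf]
      rw [h2, hswt]
      simp only [beq_self_eq_true, Bool.true_and, if_true]
      rw [show a2 ++ ' ' :: b2 = (a2 ++ [' ']) ++ b2 by simp,
          show w2.length + 1 = (a2 ++ [' ']).length by
            have := pv_len_of_lower h2; simp; omega,
          List.drop_left]
    · rw [if_neg (by exact fun hc => h2 hc.2)]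
      have : (PySem.Chars.lower a2 == w2) = false := by simp; exact h2
      rw [this]
      simp
  · rw [pv_find_no_space hb,
        pv_startswith_false (by simp : ' ' ∈ w2 ++ ' ' :: []) hb]
    simp

-- the prefix-stripping phases agree
lemma pv_strip_eq (l : List Char) :
    pvLoopA l pvPrefixes =
      (let i := PySem.Chars.find l [' ']
       if 0 ≤ i then
         let w1 := PySem.Chars.lower (PySem.Chars.slice l none (some i))
         if pvOneWord.contains w1 then
           PySem.Chars.slice l (some (i + 1)) none
         else
           match PySem.Dict.get? pvTwoWord w1 with
           | some w2 =>
               let tl := PySem.Chars.slice l (some (i + 1)) none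
               let j := PySem.Chars.find tl [' ']
               if 0 ≤ j ∧ PySem.Chars.lower (PySem.Chars.slice tl none (some j)) = w2 then
                 PySem.Chars.slice tl (some (j + 1)) none
               else l
           | none => l
       else l) := by
  by_cases hsp : ' ' ∈ l
  · obtain ⟨a, b, ha, rfl⟩ := pv_first_space hsp
    simp only [pv_find_append ha b, pv_slice_take, pv_slice_dropB]
    rw [if_pos (Int.natCast_nonneg _)]
    -- unfold A's loop over the literal prefix list and split each test at its first space
    simp only [pvLoopA, pvPrefixes]
    rw [show "show ".toList = "show".toList ++ ' ' :: [] from by decide,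
        show "what ".toList = "what".toList ++ ' ' :: [] from by decide,
        show "which ".toList = "which".toList ++ ' ' :: [] from by decide,
        show "how many ".toList = "how".toList ++ ' ' :: "many ".toList from by decide,
        show "list ".toList = "list".toList ++ ' ' :: [] from by decide,
        show "display ".toList = "display".toList ++ ' ' :: [] from by decide,
        show "get ".toList = "get".toList ++ ' ' :: [] from by decide,
        show "find ".toList = "find".toList ++ ' ' :: [] from by decide,
        show "tell me ".toList = "tell".toList ++ ' ' :: "me ".toList from by decide,
        show "give me ".toList = "give".toList ++ ' ' :: "me ".toList from by decide]
    rw [pv_cond (w := "show".toList) (by decide) ha [] b,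
        pv_cond (w := "what".toList) (by decide) ha [] b,
        pv_cond (w := "which".toList) (by decide) ha [] b,
        pv_cond (w := "how".toList) (by decide) ha "many ".toList b,
        pv_cond (w := "list".toList) (by decide) ha [] b,
        pv_cond (w := "display".toList) (by decide) ha [] b,
        pv_cond (w := "get".toList) (by decide) ha [] b,
        pv_cond (w := "find".toList) (by decide) ha [] b,
        pv_cond (w := "tell".toList) (by decide) ha "me ".toList b,
        pv_cond (w := "give".toList) (by decide) ha "me ".toList b]
    have hsw0 : ∀ x : List Char, PySem.Chars.startswith x ([] : List Char) = true := by
      intro x; simp [PySem.Chars.startswith, List.isPrefixOf]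
    simp only [hsw0, Bool.and_true]
    by_cases h1 : PySem.Chars.lower a = ['s', 'h', 'o', 'w']
    · have hl := pv_len_of_lower h1
      simp only [List.length_append] at hl ⊢
      simp [pvOneWord, h1]
      rw [pv_slice_int b _ 0 (by simp at hl; push_cast; omega)]
      simp
    by_cases h2 : PySem.Chars.lower a = ['w', 'h', 'a', 't']
    · have hl := pv_len_of_lower h2
      simp only [List.length_append] at hl ⊢
      simp [pvOneWord, h2]
      rw [pv_slice_int b _ 0 (by simp at hl; push_cast; omega)]
      simp
    by_cases h3 : PySem.Chars.lower a = ['w', 'h', 'i', 'c', 'h']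
    · have hl := pv_len_of_lower h3
      simp only [List.length_append] at hl ⊢
      simp [pvOneWord, h3]
      rw [pv_slice_int b _ 0 (by simp at hl; push_cast; omega)]
      simp
    by_cases h4 : PySem.Chars.lower a = ['h', 'o', 'w']
    · have hl := pv_len_of_lower h4
      rw [show "many ".toList = "many".toList ++ ' ' :: [] from by decide]
      simp [pvOneWord, pvTwoWord, PySem.Dict.get?, h4]
      rw [pv_inner b (a ++ ' ' :: b) ['m', 'a', 'n', 'y'] (['m', 'a', 'n', 'y'] ++ [' ']) (by decide) (by decide)]
      by_cases hsw : PySem.Chars.startswith (PySem.Chars.lower b) ['m', 'a', 'n', 'y', ' '] = true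
      · have hv := pv_slice_int (a := a) b 9 5 (by simp at hl; push_cast; omega)
        simp [hsw, hv]
      · simp [hsw]
    by_cases h5 : PySem.Chars.lower a = ['l', 'i', 's', 't']
    · have hl := pv_len_of_lower h5
      simp only [List.length_append] at hl ⊢
      simp [pvOneWord, h5]
      rw [pv_slice_int b _ 0 (by simp at hl; push_cast; omega)]
      simp
    by_cases h6 : PySem.Chars.lower a = ['d', 'i', 's', 'p', 'l', 'a', 'y']
    · have hl := pv_len_of_lower h6
      simp only [List.length_append] at hl ⊢
      simp [pvOneWord, h6]
      rw [pv_slice_int b _ 0 (by simp at hl; push_cast; omega)]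
      simp
    by_cases h7 : PySem.Chars.lower a = ['g', 'e', 't']
    · have hl := pv_len_of_lower h7
      simp only [List.length_append] at hl ⊢
      simp [pvOneWord, h7]
      rw [pv_slice_int b _ 0 (by simp at hl; push_cast; omega)]
      simp
    by_cases h8 : PySem.Chars.lower a = ['f', 'i', 'n', 'd']
    · have hl := pv_len_of_lower h8
      simp only [List.length_append] at hl ⊢
      simp [pvOneWord, h8]
      rw [pv_slice_int b _ 0 (by simp at hl; push_cast; omega)]
      simp
    by_cases h9 : PySem.Chars.lower a = ['t', 'e', 'l', 'l']
    · have hl := pv_len_of_lower h9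
      rw [show "me ".toList = "me".toList ++ ' ' :: [] from by decide]
      simp [pvOneWord, pvTwoWord, PySem.Dict.get?, h9]
      rw [pv_inner b (a ++ ' ' :: b) ['m', 'e'] (['m', 'e'] ++ [' ']) (by decide) (by decide)]
      by_cases hsw : PySem.Chars.startswith (PySem.Chars.lower b) ['m', 'e', ' '] = true
      · have hv := pv_slice_int (a := a) b 8 3 (by simp at hl; push_cast; omega)
        simp [hsw, hv]
      · simp [hsw]
    by_cases h10 : PySem.Chars.lower a = ['g', 'i', 'v', 'e']
    · have hl := pv_len_of_lower h10
      rw [show "me ".toList = "me".toList ++ ' ' :: [] from by decide]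
      simp [pvOneWord, pvTwoWord, PySem.Dict.get?, h10]
      rw [pv_inner b (a ++ ' ' :: b) ['m', 'e'] (['m', 'e'] ++ [' ']) (by decide) (by decide)]
      by_cases hsw : PySem.Chars.startswith (PySem.Chars.lower b) ['m', 'e', ' '] = true
      · have hv := pv_slice_int (a := a) b 8 3 (by simp at hl; push_cast; omega)
        simp [hsw, hv]
      · simp [hsw]
    · have h4' : ¬(['h', 'o', 'w'] = PySem.Chars.lower a) := fun h => h4 h.symm
      have h9' : ¬(['t', 'e', 'l', 'l'] = PySem.Chars.lower a) := fun h => h9 h.symm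
      have h10' : ¬(['g', 'i', 'v', 'e'] = PySem.Chars.lower a) := fun h => h10 h.symm
      simp [pvOneWord, pvTwoWord, PySem.Dict.get?, h1, h2, h3, h4, h5, h6, h7, h8, h9, h10,
            h4', h9', h10']
  · rw [pv_find_no_space hsp,
        pv_loopA_no_space hsp pvPrefixes (by decide)]
    norm_num

-- the capitalisation phases agree
lemma pv_cap_eq (t : List Char) :
    (match t with
      | [] => ([] : List Char)
      | c :: cs => PySem.Chars.upperChar c :: cs)
    = PySem.Chars.upper (PySem.Chars.slice t none (some 1)) ++ PySem.Chars.slice t (some 1) none := by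
  have h1 : PySem.Chars.slice t none (some 1) = t.take 1 := by
    simpa using PySem.List.slice_to t (b := 1) (by omega)
  have h2 : PySem.Chars.slice t (some 1) none = t.tail := by
    simpa using PySem.List.slice_from_one t
  rw [h1, h2]
  cases t with
  | nil => simp [PySem.Chars.upper]
  | cons c cs => simp [PySem.Chars.upper]

-- ===== VERDICT (by name: the statement is the Claim_ definition above) =====
theorem extract_chart_title_py_spec : Claim_equal_extract_chart_title_py := by
  intro question _
  unfold Spec_extract_chart_title_py extract_chart_title_py extract_chart_title_py_alt
  rw [pv_strip_eq question.toList]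
  exact congrArg String.ofList (pv_cap_eq _)
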